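-- pv_equiv track=rewrite | github.com/kundajelab/humbio51-student | helpers/sequence_alignment_helpers.py | format_alignment_linebreak_withnumbering
-- ===== SOURCE A (Python) =====
-- def format_alignment_linebreak_withnumbering(align1_linebreaks,align2_linebreaks,score,begin,end,seq1_id,seq2_id):
--     s=[]
--     bpstart1=0
--     bpend1=0
--     bpstart2=0
--     bpend2=0
--     for line in range(0,len(align1_linebreaks)):
--         bpstart1 = bpend1 + 1
--         bpend1 = bpend1 + 50 - align1_linebreaks[line].count('-')
--         bpstart2 = bpend2 + 1
--         bpend2 = bpend2 + 50 - align2_linebreaks[line].count('-')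
--         s.append(seq1_id + ' Range:'+str(bpstart1)+'-'+str(bpend1))
--         s.append('\n')
--         s.append(seq1_id + ":" + "%s%s\n" %(" "*((max(len(seq1_id),len(seq2_id))+1)-len(seq1_id)),align1_linebreaks[line]))
--         s.append("%s%s\n" % (" "*(max(len(seq1_id),len(seq2_id))+2), "|" * (len(align1_linebreaks[line]))))
--         s.append(seq2_id + ":" + "%s%s\n" %(" "*((max(len(seq1_id),len(seq2_id))+1)-len(seq2_id)),align2_linebreaks[line]))
--         s.append(seq2_id + ' Range:'+str(bpstart2)+'-'+str(bpend2))
--         s.append('\n')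
--         s.append('\n')
--     s.append("  Score=  %g\n" % score)
--     s.append("  Begin=  %g\n" % begin)
--     s.append("  End  =  %g\n" % end)
--     s.append("  Length= %g\n" % (end-begin))
--     return ''.join(s)
-- ===== SOURCE B (Python) =====
-- def _nongaps(gapcounts, k):
--     """Non-gap characters contained in the first k lines, from their per-line gap counts."""
--     return 50 * k - sum(gapcounts[:k])
--
-- def _block(seq1_id, seq2_id, l1, l2, r1a, r1b, r2a, r2b):
--     pad = max(len(seq1_id), len(seq2_id))
--     return ('%s Range:%d-%d\n'
--             '%s:%s%s\n'
--             '%s%s\n'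
--             '%s:%s%s\n'
--             '%s Range:%d-%d\n\n' % (
--                 seq1_id, r1a, r1b,
--                 seq1_id, ' ' * (pad + 1 - len(seq1_id)), l1,
--                 ' ' * (pad + 2), '|' * len(l1),
--                 seq2_id, ' ' * (pad + 1 - len(seq2_id)), l2,
--                 seq2_id, r2a, r2b))
--
-- def format_alignment_linebreak_withnumbering(align1_linebreaks, align2_linebreaks, score, begin, end, seq1_id, seq2_id):
--     g1 = [l.count('-') for l in align1_linebreaks]
--     g2 = [l.count('-') for l in align2_linebreaks]
--     blocks = [_block(seq1_id, seq2_id,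
--                      align1_linebreaks[i], align2_linebreaks[i],
--                      _nongaps(g1, i) + 1, _nongaps(g1, i + 1),
--                      _nongaps(g2, i) + 1, _nongaps(g2, i + 1))
--               for i in range(len(align1_linebreaks))]
--     footer = '  Score=  %g\n  Begin=  %g\n  End  =  %g\n  Length= %g\n' % (score, begin, end, end - begin)
--     return ''.join(blocks) + footer
-- ===== Notes on version B (the rewrite author's own statement) =====
-- stated objective: alternative
-- what changed: A threads four running bp-counters through one index-driven loop; B keeps no running state: it tabulates the per-line gap counts once and recomputes each block's range endpoints from scratch by the closed formula 50*k minus the sum over the prefix slice gapcounts[:k] (quadratic overall), then joins the per-block strings and appends the footer.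
import Mathlib
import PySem

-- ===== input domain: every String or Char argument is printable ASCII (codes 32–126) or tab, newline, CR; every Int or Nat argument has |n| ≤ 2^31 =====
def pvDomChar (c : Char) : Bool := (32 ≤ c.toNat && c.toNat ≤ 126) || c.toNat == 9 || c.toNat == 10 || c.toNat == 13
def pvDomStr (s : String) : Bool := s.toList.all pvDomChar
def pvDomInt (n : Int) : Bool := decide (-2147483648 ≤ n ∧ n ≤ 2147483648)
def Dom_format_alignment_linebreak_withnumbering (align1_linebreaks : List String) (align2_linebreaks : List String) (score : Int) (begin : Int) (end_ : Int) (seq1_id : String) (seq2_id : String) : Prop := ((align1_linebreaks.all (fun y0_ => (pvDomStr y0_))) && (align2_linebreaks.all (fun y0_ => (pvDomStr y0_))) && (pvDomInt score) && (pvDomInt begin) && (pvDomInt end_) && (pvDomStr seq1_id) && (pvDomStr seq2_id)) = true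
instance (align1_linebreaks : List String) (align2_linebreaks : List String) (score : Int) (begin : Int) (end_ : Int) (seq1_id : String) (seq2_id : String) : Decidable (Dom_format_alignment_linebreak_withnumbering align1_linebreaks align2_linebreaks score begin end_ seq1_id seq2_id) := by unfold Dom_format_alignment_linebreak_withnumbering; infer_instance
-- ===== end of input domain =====

-- ===== PORT A =====
-- B re-implements A without any running state: each block's range endpoints come from the
-- closed formula 50*k minus the gap count summed over the prefix slice lines[:k]
-- (objective: alternative decomposition; return value only, no mutation).
-- pvG n = Python's '%g' % n for an int n (exact for |n| ≤ 2^32: such ints are exact doubles,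
-- so '%g' rounds the decimal digits to 6 significant digits with ties to even).
def pvG (n : Int) : String :=
  let ds := PySem.Int.toChars (n.natAbs : Int)
  let sign : String := if n < 0 then "-" else ""
  if ds.length ≤ 6 then sign ++ String.ofList ds
  else
    let k := ds.length - 6
    let m6 := n.natAbs / 10 ^ k
    let r := n.natAbs % 10 ^ k
    let half := 5 * 10 ^ (k - 1)
    let m6' := if half < r ∨ (r = half ∧ m6 % 2 = 1) then m6 + 1 else m6
    let p : Nat × Nat := if m6' = 1000000 then (100000, ds.length) else (m6', ds.length - 1)
    let mds := PySem.Int.toChars (p.1 : Int)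
    let frac := ((mds.drop 1).reverse.dropWhile (fun c => c = '0')).reverse
    sign ++ String.ofList (mds.take 1)
      ++ (if frac.isEmpty then "" else "." ++ String.ofList frac)
      ++ "e+" ++ (if p.2 < 10 then "0" else "") ++ PySem.Int.toStr (p.2 : Int)

-- pvRep c n = Python's (one-char string c) * n (a negative n gives "")
def pvRep (c : Char) (n : Int) : String := String.ofList (List.replicate n.toNat c)

def format_alignment_linebreak_withnumbering (align1_linebreaks : List String) (align2_linebreaks : List String) (score : Int) (begin : Int) (end_ : Int) (seq1_id : String) (seq2_id : String) : String :=
  let step : (List String × Int × Int × Int × Int) → Int → (List String × Int × Int × Int × Int) := fun st line =>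
    let l1 := PySem.List.pyGetD align1_linebreaks line ""
    let l2 := PySem.List.pyGetD align2_linebreaks line ""
    let bpstart1 := st.2.2.1 + 1
    let bpend1 := st.2.2.1 + 50 - (PySem.Str.count l1 "-" : Int)
    let bpstart2 := st.2.2.2.2 + 1
    let bpend2 := st.2.2.2.2 + 50 - (PySem.Str.count l2 "-" : Int)
    let s := st.1 ++ [seq1_id ++ " Range:" ++ PySem.Int.toStr bpstart1 ++ "-" ++ PySem.Int.toStr bpend1]
    let s := s ++ ["\n"]
    let s := s ++ [seq1_id ++ ":" ++ pvRep ' ' (max (PySem.Str.len seq1_id) (PySem.Str.len seq2_id) + 1 - PySem.Str.len seq1_id) ++ l1 ++ "\n"]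
    let s := s ++ [pvRep ' ' (max (PySem.Str.len seq1_id) (PySem.Str.len seq2_id) + 2) ++ pvRep '|' (PySem.Str.len l1) ++ "\n"]
    let s := s ++ [seq2_id ++ ":" ++ pvRep ' ' (max (PySem.Str.len seq1_id) (PySem.Str.len seq2_id) + 1 - PySem.Str.len seq2_id) ++ l2 ++ "\n"]
    let s := s ++ [seq2_id ++ " Range:" ++ PySem.Int.toStr bpstart2 ++ "-" ++ PySem.Int.toStr bpend2]
    let s := s ++ ["\n"]
    let s := s ++ ["\n"]
    (s, bpstart1, bpend1, bpstart2, bpend2)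
  let st := (PySem.List.pyRange 0 (align1_linebreaks.length : Int) 1).foldl step ([], 0, 0, 0, 0)
  let s := st.1 ++ ["  Score=  " ++ pvG score ++ "\n"]
  let s := s ++ ["  Begin=  " ++ pvG begin ++ "\n"]
  let s := s ++ ["  End  =  " ++ pvG end_ ++ "\n"]
  let s := s ++ ["  Length= " ++ pvG (end_ - begin) ++ "\n"]
  PySem.Str.join "" s

-- ===== PORT B =====
-- Source B's _nongaps: non-gap characters in the first k lines, from their per-line gap counts
def pvNongaps (gapcounts : List Int) (k : Int) : Int :=
  50 * k - (PySem.List.slice gapcounts none (some k)).sum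

-- Source B's _block: pure formatting of one block from its two lines and four endpoints
def pvBlockB (seq1_id seq2_id l1 l2 : String) (r1a r1b r2a r2b : Int) : String :=
  let pad := max (PySem.Str.len seq1_id) (PySem.Str.len seq2_id)
  seq1_id ++ " Range:" ++ PySem.Int.toStr r1a ++ "-" ++ PySem.Int.toStr r1b ++ "\n"
  ++ seq1_id ++ ":" ++ pvRep ' ' (pad + 1 - PySem.Str.len seq1_id) ++ l1 ++ "\n"
  ++ pvRep ' ' (pad + 2) ++ pvRep '|' (PySem.Str.len l1) ++ "\n"
  ++ seq2_id ++ ":" ++ pvRep ' ' (pad + 1 - PySem.Str.len seq2_id) ++ l2 ++ "\n"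
  ++ seq2_id ++ " Range:" ++ PySem.Int.toStr r2a ++ "-" ++ PySem.Int.toStr r2b ++ "\n\n"

def format_alignment_linebreak_withnumbering_alt (align1_linebreaks : List String) (align2_linebreaks : List String) (score : Int) (begin : Int) (end_ : Int) (seq1_id : String) (seq2_id : String) : String :=
  let g1 := align1_linebreaks.map (fun l => (PySem.Str.count l "-" : Int))
  let g2 := align2_linebreaks.map (fun l => (PySem.Str.count l "-" : Int))
  let blocks := (PySem.List.pyRange 0 (align1_linebreaks.length : Int) 1).map (fun i =>
    pvBlockB seq1_id seq2_id (PySem.List.pyGetD align1_linebreaks i "") (PySem.List.pyGetD align2_linebreaks i "")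
      (pvNongaps g1 i + 1) (pvNongaps g1 (i + 1))
      (pvNongaps g2 i + 1) (pvNongaps g2 (i + 1)))
  let footer := "  Score=  " ++ pvG score ++ "\n  Begin=  " ++ pvG begin ++ "\n  End  =  " ++ pvG end_ ++ "\n  Length= " ++ pvG (end_ - begin) ++ "\n"
  PySem.Str.join "" blocks ++ footer

-- ===== PRECONDITION & SPEC =====
-- Pre_ excludes only the inputs where align2_linebreaks is shorter than align1_linebreaks:
-- there A raises IndexError (align2_linebreaks[line]); it excludes nothing A returns on.
def Pre_format_alignment_linebreak_withnumbering (align1_linebreaks : List String) (align2_linebreaks : List String) (score : Int) (begin : Int) (end_ : Int) (seq1_id : String) (seq2_id : String) : Prop :=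
  align1_linebreaks.length ≤ align2_linebreaks.length
instance (align1_linebreaks : List String) (align2_linebreaks : List String) (score : Int) (begin : Int) (end_ : Int) (seq1_id : String) (seq2_id : String) : Decidable (Pre_format_alignment_linebreak_withnumbering align1_linebreaks align2_linebreaks score begin end_ seq1_id seq2_id) := by unfold Pre_format_alignment_linebreak_withnumbering; infer_instance

def pvWitness_format_alignment_linebreak_withnumbering : List String × List String × Int × Int × Int × String × String :=
  (["AC--A"], ["ACGTA"], 5, 1, 5, "s1", "s2")

def Spec_format_alignment_linebreak_withnumbering (align1_linebreaks : List String) (align2_linebreaks : List String) (score : Int) (begin : Int) (end_ : Int) (seq1_id : String) (seq2_id : String) (out : String) : Prop := out = format_alignment_linebreak_withnumbering_alt align1_linebreaks align2_linebreaks score begin end_ seq1_id seq2_id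
instance (align1_linebreaks : List String) (align2_linebreaks : List String) (score : Int) (begin : Int) (end_ : Int) (seq1_id : String) (seq2_id : String) (out : String) : Decidable (Spec_format_alignment_linebreak_withnumbering align1_linebreaks align2_linebreaks score begin end_ seq1_id seq2_id out) := by unfold Spec_format_alignment_linebreak_withnumbering; infer_instance

-- ===== CLAIM (what is proved, stated in full; the proofs are below) =====
def Claim_equal_format_alignment_linebreak_withnumbering : Prop := ∀ (align1_linebreaks : List String) (align2_linebreaks : List String) (score : Int) (begin : Int) (end_ : Int) (seq1_id : String) (seq2_id : String), Dom_format_alignment_linebreak_withnumbering align1_linebreaks align2_linebreaks score begin end_ seq1_id seq2_id → Pre_format_alignment_linebreak_withnumbering align1_linebreaks align2_linebreaks score begin end_ seq1_id seq2_id → Spec_format_alignment_linebreak_withnumbering align1_linebreaks align2_linebreaks score begin end_ seq1_id seq2_id (format_alignment_linebreak_withnumbering align1_linebreaks align2_linebreaks score begin end_ seq1_id seq2_id)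

-- ===== LEMMAS AND PROOFS =====

-- flattened character content of a list of strings
def pvJ (xs : List String) : List Char := (xs.map String.toList).flatten

@[simp] theorem pvJ_nil : pvJ [] = [] := rfl
@[simp] theorem pvJ_cons (x : String) (xs : List String) : pvJ (x :: xs) = x.toList ++ pvJ xs := by
  simp [pvJ]
@[simp] theorem pvJ_append (xs ys : List String) : pvJ (xs ++ ys) = pvJ xs ++ pvJ ys := by
  simp [pvJ]

theorem pvChars_join_nil_flatten (l : List (List Char)) : PySem.Chars.join [] l = l.flatten := by
  induction l with
  | nil => simp [PySem.Chars.join_nil]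
  | cons a t ih =>
    cases t with
    | nil => simp [PySem.Chars.join, List.intercalate]
    | cons b t2 => rw [PySem.Chars.join_cons_cons]; simp [ih]

theorem pvJoin_empty_toList (xs : List String) : (PySem.Str.join "" xs).toList = pvJ xs := by
  rw [PySem.Str.toList_join]
  simpa [pvJ] using pvChars_join_nil_flatten (xs.map String.toList)

-- the non-gap width of one line
def pvW (l : String) : Int := 50 - (PySem.Str.count l "-" : Int)

-- pvE xs k = sum of the widths of the first k lines
def pvE (xs : List String) (k : Nat) : Int := ((xs.take k).map pvW).sum

theorem pvNongaps_eq_pvE (xs : List String) (k : Nat) (h : k ≤ xs.length) :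
    pvNongaps (xs.map (fun l => (PySem.Str.count l "-" : Int))) (k : Int) = pvE xs k := by
  unfold pvNongaps pvE
  rw [PySem.List.slice_to_natCast, ← List.map_take]
  have hlen : (xs.take k).length = k := by simp [Nat.min_eq_left h]
  have : ((xs.take k).map pvW).sum
      = 50 * ((xs.take k).length : Int) - ((xs.take k).map (fun l => (PySem.Str.count l "-" : Int))).sum := by
    induction (xs.take k) with
    | nil => simp
    | cons a t ih => simp [pvW, ih]; ring
  rw [this, hlen]

@[simp] theorem pvE_zero (xs : List String) : pvE xs 0 = 0 := rfl
theorem pvE_cons_succ (x : String) (xs : List String) (k : Nat) :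
    pvE (x :: xs) (k + 1) = pvW x + pvE xs k := by
  simp [pvE]

-- the block list, written as the structural recursion both proofs are reduced to
def pvBlocks (s1 s2 : String) (c1 c2 : Int) : List String → List String → List String
  | x :: xs, y :: ys =>
      pvBlockB s1 s2 x y (c1 + 1) (c1 + pvW x) (c2 + 1) (c2 + pvW y)
        :: pvBlocks s1 s2 (c1 + pvW x) (c2 + pvW y) xs ys
  | _, _ => []

-- A's loop body, as a function of the two fetched lines (the same values A fetches)
def pvStep (seq1_id seq2_id : String) (st : List String × Int × Int × Int × Int) (l1 l2 : String) : List String × Int × Int × Int × Int :=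
  (st.1 ++ [seq1_id ++ " Range:" ++ PySem.Int.toStr (st.2.2.1 + 1) ++ "-" ++ PySem.Int.toStr (st.2.2.1 + 50 - (PySem.Str.count l1 "-" : Int))]
        ++ ["\n"]
        ++ [seq1_id ++ ":" ++ pvRep ' ' (max (PySem.Str.len seq1_id) (PySem.Str.len seq2_id) + 1 - PySem.Str.len seq1_id) ++ l1 ++ "\n"]
        ++ [pvRep ' ' (max (PySem.Str.len seq1_id) (PySem.Str.len seq2_id) + 2) ++ pvRep '|' (PySem.Str.len l1) ++ "\n"]
        ++ [seq2_id ++ ":" ++ pvRep ' ' (max (PySem.Str.len seq1_id) (PySem.Str.len seq2_id) + 1 - PySem.Str.len seq2_id) ++ l2 ++ "\n"]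
        ++ [seq2_id ++ " Range:" ++ PySem.Int.toStr (st.2.2.2.2 + 1) ++ "-" ++ PySem.Int.toStr (st.2.2.2.2 + 50 - (PySem.Str.count l2 "-" : Int))]
        ++ ["\n"] ++ ["\n"],
   st.2.2.1 + 1, st.2.2.1 + 50 - (PySem.Str.count l1 "-" : Int),
   st.2.2.2.2 + 1, st.2.2.2.2 + 50 - (PySem.Str.count l2 "-" : Int))

theorem pvPortA_eq (align1_linebreaks align2_linebreaks : List String) (score begin end_ : Int) (seq1_id seq2_id : String) :
    format_alignment_linebreak_withnumbering align1_linebreaks align2_linebreaks score begin end_ seq1_id seq2_id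
    = PySem.Str.join "" (((PySem.List.pyRange 0 (align1_linebreaks.length : Int) 1).foldl
        (fun st line => pvStep seq1_id seq2_id st (PySem.List.pyGetD align1_linebreaks line "") (PySem.List.pyGetD align2_linebreaks line ""))
        ([], 0, 0, 0, 0)).1
      ++ ["  Score=  " ++ pvG score ++ "\n"] ++ ["  Begin=  " ++ pvG begin ++ "\n"]
      ++ ["  End  =  " ++ pvG end_ ++ "\n"] ++ ["  Length= " ++ pvG (end_ - begin) ++ "\n"]) := rfl

theorem pvFold_range_zip {σ : Type} (f : σ → String → String → σ) :
    ∀ (xs ys : List String) (init : σ), xs.length ≤ ys.length →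
    (List.range xs.length).foldl (fun st k => f st (xs.getD k "") (ys.getD k "")) init
      = (xs.zip ys).foldl (fun st p => f st p.1 p.2) init := by
  intro xs
  induction xs with
  | nil => intro ys init h; simp
  | cons x xs ih =>
    intro ys init h
    cases ys with
    | nil => simp at h
    | cons y ys =>
      rw [List.length_cons, List.range_succ_eq_map]
      simp only [List.foldl_cons, List.foldl_map, List.getD_cons_zero, List.getD_cons_succ,
        List.zip_cons_cons]
      exact ih ys (f init x y) (Nat.succ_le_succ_iff.mp h)

theorem pvFoldIdx {σ : Type} (f : σ → String → String → σ) (xs ys : List String) (init : σ)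
    (h : xs.length ≤ ys.length) :
    (PySem.List.pyRange 0 (xs.length : Int) 1).foldl
        (fun st i => f st (PySem.List.pyGetD xs i "") (PySem.List.pyGetD ys i "")) init
      = (xs.zip ys).foldl (fun st p => f st p.1 p.2) init := by
  rw [PySem.List.pyRange_one]
  simp only [List.foldl_map, zero_add, Int.sub_zero, Int.toNat_natCast, PySem.List.pyGetD_natCast]
  exact pvFold_range_zip f xs ys init h

theorem pvBlockB_toList (s1 s2 x y : String) (c1 c2 : Int) :
    (pvBlockB s1 s2 x y (c1 + 1) (c1 + pvW x) (c2 + 1) (c2 + pvW y)).toList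
    = pvJ ([s1 ++ " Range:" ++ PySem.Int.toStr (c1 + 1) ++ "-" ++ PySem.Int.toStr (c1 + 50 - (PySem.Str.count x "-" : Int))]
        ++ ["\n"]
        ++ [s1 ++ ":" ++ pvRep ' ' (max (PySem.Str.len s1) (PySem.Str.len s2) + 1 - PySem.Str.len s1) ++ x ++ "\n"]
        ++ [pvRep ' ' (max (PySem.Str.len s1) (PySem.Str.len s2) + 2) ++ pvRep '|' (PySem.Str.len x) ++ "\n"]
        ++ [s2 ++ ":" ++ pvRep ' ' (max (PySem.Str.len s1) (PySem.Str.len s2) + 1 - PySem.Str.len s2) ++ y ++ "\n"]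
        ++ [s2 ++ " Range:" ++ PySem.Int.toStr (c2 + 1) ++ "-" ++ PySem.Int.toStr (c2 + pvW y)]
        ++ ["\n"] ++ ["\n"]) := by
  have hnn : ("\n\n" : String) = "\n" ++ "\n" := by decide
  simp only [pvBlockB]
  rw [hnn]
  simp [String.toList_append, List.append_assoc, pvW, add_sub_assoc]

-- A's fold produces exactly the characters of pvBlocks
theorem pvMain (s1 s2 : String) :
    ∀ (l1 l2 : List String) (st : List String × Int × Int × Int × Int),
    pvJ (((l1.zip l2).foldl (fun st p => pvStep s1 s2 st p.1 p.2) st).1)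
      = pvJ st.1 ++ pvJ (pvBlocks s1 s2 st.2.2.1 st.2.2.2.2 l1 l2) := by
  intro l1
  induction l1 with
  | nil => intro l2 st; simp [pvBlocks]
  | cons x xs ih =>
    intro l2 st
    cases l2 with
    | nil => simp [pvBlocks]
    | cons y ys =>
      simp only [List.zip_cons_cons, List.foldl_cons, pvBlocks]
      rw [ih ys]
      simp only [pvStep]
      have e1 : st.2.2.1 + 50 - (PySem.Str.count x "-" : Int) = st.2.2.1 + pvW x := by
        unfold pvW; ring
      have e2 : st.2.2.2.2 + 50 - (PySem.Str.count y "-" : Int) = st.2.2.2.2 + pvW y := by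
        unfold pvW; ring
      rw [e1, e2]
      simp only [pvJ_cons, pvJ_append]
      rw [pvBlockB_toList s1 s2 x y st.2.2.1 st.2.2.2.2]
      simp [List.append_assoc, pvW, add_sub_assoc]

-- B's range-driven map produces exactly pvBlocks
theorem pvBMap (s1 s2 : String) :
    ∀ (xs ys : List String), xs.length ≤ ys.length → ∀ (c1 c2 : Int),
    (List.range xs.length).map (fun i =>
        pvBlockB s1 s2 (xs.getD i "") (ys.getD i "")
          (c1 + pvE xs i + 1) (c1 + pvE xs (i + 1))
          (c2 + pvE ys i + 1) (c2 + pvE ys (i + 1)))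
      = pvBlocks s1 s2 c1 c2 xs ys := by
  intro xs
  induction xs with
  | nil => intro ys h c1 c2; simp [pvBlocks]
  | cons x xs ih =>
    intro ys h c1 c2
    cases ys with
    | nil => simp at h
    | cons y ys =>
      rw [List.length_cons, List.range_succ_eq_map]
      simp only [List.map_cons, List.map_map, pvBlocks]
      refine List.cons_eq_cons.mpr ⟨?_, ?_⟩
      · simp [pvE]
      · rw [← ih ys (Nat.succ_le_succ_iff.mp h) (c1 + pvW x) (c2 + pvW y)]
        apply List.map_congr_left
        intro i _
        simp only [Function.comp, List.getD_cons_succ, pvE_cons_succ, ← add_assoc]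

theorem pvPortB_blocks (a1 a2 : List String) (s1 s2 : String) (h : a1.length ≤ a2.length) :
    (PySem.List.pyRange 0 (a1.length : Int) 1).map (fun i =>
      pvBlockB s1 s2 (PySem.List.pyGetD a1 i "") (PySem.List.pyGetD a2 i "")
        (pvNongaps (a1.map (fun l => (PySem.Str.count l "-" : Int))) i + 1)
        (pvNongaps (a1.map (fun l => (PySem.Str.count l "-" : Int))) (i + 1))
        (pvNongaps (a2.map (fun l => (PySem.Str.count l "-" : Int))) i + 1)
        (pvNongaps (a2.map (fun l => (PySem.Str.count l "-" : Int))) (i + 1)))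
    = pvBlocks s1 s2 0 0 a1 a2 := by
  rw [PySem.List.pyRange_one]
  simp only [List.map_map, zero_add, Int.sub_zero, Int.toNat_natCast]
  rw [← pvBMap s1 s2 a1 a2 h 0 0]
  apply List.map_congr_left
  intro i hi
  have hi' : i < a1.length := List.mem_range.mp hi
  have hc : ((i : Int) + 1) = ((i + 1 : Nat) : Int) := by push_cast; ring
  simp only [Function.comp, PySem.List.pyGetD_natCast, hc]
  rw [pvNongaps_eq_pvE a1 i (Nat.le_of_lt hi'),
      pvNongaps_eq_pvE a1 (i + 1) hi',
      pvNongaps_eq_pvE a2 i (Nat.le_of_lt (Nat.lt_of_lt_of_le hi' h)),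
      pvNongaps_eq_pvE a2 (i + 1) (Nat.lt_of_lt_of_le hi' h)]
  simp

theorem pvFooter_toList (score begin end_ : Int) :
    ("  Score=  " ++ pvG score ++ "\n  Begin=  " ++ pvG begin ++ "\n  End  =  " ++ pvG end_ ++ "\n  Length= " ++ pvG (end_ - begin) ++ "\n").toList
    = pvJ (["  Score=  " ++ pvG score ++ "\n"] ++ ["  Begin=  " ++ pvG begin ++ "\n"]
        ++ ["  End  =  " ++ pvG end_ ++ "\n"] ++ ["  Length= " ++ pvG (end_ - begin) ++ "\n"]) := by
  have h1 : ("\n  Begin=  " : String) = "\n" ++ "  Begin=  " := by decide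
  have h2 : ("\n  End  =  " : String) = "\n" ++ "  End  =  " := by decide
  have h3 : ("\n  Length= " : String) = "\n" ++ "  Length= " := by decide
  rw [h1, h2, h3]
  simp [String.toList_append, List.append_assoc]

-- ===== VERDICT (by name: the statement is the Claim_ definition above) =====
theorem format_alignment_linebreak_withnumbering_spec : Claim_equal_format_alignment_linebreak_withnumbering := by
  intro a1 a2 score begin end_ s1 s2 _ hpre
  unfold Spec_format_alignment_linebreak_withnumbering
  rw [pvPortA_eq]
  unfold format_alignment_linebreak_withnumbering_alt
  refine String.toList_inj.mp ?_
  rw [pvJoin_empty_toList, String.toList_append, pvJoin_empty_toList,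
    pvFoldIdx (fun st l1 l2 => pvStep s1 s2 st l1 l2) a1 a2 ([], 0, 0, 0, 0) hpre]
  rw [pvFooter_toList, pvPortB_blocks a1 a2 s1 s2 hpre]
  have hm := pvMain s1 s2 a1 a2 ([], 0, 0, 0, 0)
  simp only [pvJ_nil, List.nil_append] at hm
  simp [hm]
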